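-- pv_equiv track=rewrite | github.com/pypi-data/pypi-mirror-320 | packages/utilmy/utilmy-0.1.17367756-py3-none-any.whl/utilmy/asearch/ausea/data_pd.py | ner_tags_to_ner_list
-- ===== SOURCE A (Python) =====
-- def ner_tags_to_ner_list(words, tags):
--     ner_list = []
--     start_idx = 0
--     for word, tag in zip(words, tags):
--         if tag != 'O':
--             end_idx = start_idx + len(str(word))
--             ner_list.append((str(start_idx), str(end_idx), tag))
--         start_idx += len(str(word)) + 1
--     return ner_list
-- ===== SOURCE B (Python) =====
-- def ner_tags_to_ner_list(words, tags):
--     # Phase 1: prefix table of starting character offsets.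
--     starts = [0]
--     for w in words:
--         starts.append(starts[-1] + len(str(w)) + 1)
--     # Phase 2: extract spans for non-'O' tags (zip truncates to the shortest).
--     return [(str(s), str(s + len(str(w))), t)
--             for w, t, s in zip(words, tags, starts) if t != 'O']
-- ===== Notes on version B (the rewrite author's own statement) =====
-- stated objective: alternative
-- what changed: Splits A's single stateful loop into two phases: first a prefix table of start offsets is built, then a list comprehension over zip(words, tags, starts) emits the spans.
import Mathlib
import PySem

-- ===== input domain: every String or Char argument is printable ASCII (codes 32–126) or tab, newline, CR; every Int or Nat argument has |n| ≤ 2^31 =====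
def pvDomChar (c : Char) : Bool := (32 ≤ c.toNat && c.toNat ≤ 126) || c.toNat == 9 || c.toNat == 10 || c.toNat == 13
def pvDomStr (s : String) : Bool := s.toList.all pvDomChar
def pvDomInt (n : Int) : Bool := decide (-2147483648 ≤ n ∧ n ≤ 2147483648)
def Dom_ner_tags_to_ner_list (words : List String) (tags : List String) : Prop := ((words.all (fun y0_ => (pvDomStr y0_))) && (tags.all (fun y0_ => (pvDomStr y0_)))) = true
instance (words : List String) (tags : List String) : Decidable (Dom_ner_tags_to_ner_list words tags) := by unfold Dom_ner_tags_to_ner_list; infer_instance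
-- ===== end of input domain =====

-- B replaces A's single stateful loop by a prefix table of start offsets plus a
-- separate span-extraction pass (objective: alternative decomposition, same cost).

-- ===== PORT A =====
def ner_tags_to_ner_list (words : List String) (tags : List String) : List (String × String × String) :=
  ((words.zip tags).foldl
    (fun (st : List (String × String × String) × Int) wt =>
      let ner :=
        if wt.2 ≠ "O" then
          st.1 ++ [(PySem.Int.toStr st.2, PySem.Int.toStr (st.2 + PySem.Str.len wt.1), wt.2)]
        else st.1
      (ner, st.2 + PySem.Str.len wt.1 + 1))
    ([], 0)).1

-- ===== PORT B =====
-- starts[-1] is PySem.List.pyGetD … (-1) 0; the accumulator is never empty, so the default is a totality guard only.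
def ner_tags_to_ner_list_alt (words : List String) (tags : List String) : List (String × String × String) :=
  let starts := words.foldl
    (fun acc w => acc ++ [PySem.List.pyGetD acc (-1) 0 + PySem.Str.len w + 1]) [0]
  (words.zip (tags.zip starts)).filterMap
    (fun wts =>
      if wts.2.1 ≠ "O" then
        some (PySem.Int.toStr wts.2.2, PySem.Int.toStr (wts.2.2 + PySem.Str.len wts.1), wts.2.1)
      else none)

-- ===== PRECONDITION & SPEC =====
def Spec_ner_tags_to_ner_list (words : List String) (tags : List String) (out : List (String × String × String)) : Prop := out = ner_tags_to_ner_list_alt words tags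
instance (words : List String) (tags : List String) (out : List (String × String × String)) : Decidable (Spec_ner_tags_to_ner_list words tags out) := by unfold Spec_ner_tags_to_ner_list; infer_instance

-- ===== CLAIM (what is proved, stated in full; the proofs are below) =====
def Claim_equal_ner_tags_to_ner_list : Prop := ∀ (words : List String) (tags : List String), Dom_ner_tags_to_ner_list words tags → Spec_ner_tags_to_ner_list words tags (ner_tags_to_ner_list words tags)

-- ===== LEMMAS AND PROOFS =====

/-- The list of start offsets of the words, beginning at `s` (one extra trailing entry). -/
def pvStartsFrom : Int → List String → List Int
  | s, [] => [s]
  | s, w :: ws => s :: pvStartsFrom (s + PySem.Str.len w + 1) ws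

/-- The common specification: spans of the non-'O' tagged words starting at offset `s`. -/
def pvSpans : List String → List String → Int → List (String × String × String)
  | [], _, _ => []
  | _ :: _, [], _ => []
  | w :: ws, t :: ts, s =>
    (if t ≠ "O" then [(PySem.Int.toStr s, PySem.Int.toStr (s + PySem.Str.len w), t)] else [])
      ++ pvSpans ws ts (s + PySem.Str.len w + 1)

theorem pvGetD_last (pre : List Int) (s : Int) :
    PySem.List.pyGetD (pre ++ [s]) (-1) 0 = s := by
  simp [PySem.List.pyGetD, PySem.List.pyGet?_neg_one_append_singleton]

theorem pvStarts_foldl (ws : List String) (pre : List Int) (s : Int) :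
    ws.foldl (fun acc w => acc ++ [PySem.List.pyGetD acc (-1) 0 + PySem.Str.len w + 1])
      (pre ++ [s]) = pre ++ pvStartsFrom s ws := by
  induction ws generalizing pre s with
  | nil => simp [pvStartsFrom]
  | cons w ws ih =>
    simp only [List.foldl_cons, pvGetD_last]
    have := ih (pre ++ [s]) (s + PySem.Str.len w + 1)
    simpa [pvStartsFrom, List.append_assoc] using this

theorem pvA_foldl (ws ts : List String) (acc : List (String × String × String)) (s : Int) :
    ((ws.zip ts).foldl
      (fun (st : List (String × String × String) × Int) wt =>
        let ner :=
          if wt.2 ≠ "O" then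
            st.1 ++ [(PySem.Int.toStr st.2, PySem.Int.toStr (st.2 + PySem.Str.len wt.1), wt.2)]
          else st.1
        (ner, st.2 + PySem.Str.len wt.1 + 1))
      (acc, s)).1 = acc ++ pvSpans ws ts s := by
  induction ws generalizing ts acc s with
  | nil => simp [pvSpans]
  | cons w ws ih =>
    cases ts with
    | nil => simp [pvSpans]
    | cons t ts =>
      simp only [List.zip_cons_cons, List.foldl_cons]
      by_cases h : t = "O"
      · simpa [pvSpans, h] using ih ts acc (s + PySem.Str.len w + 1)
      · simpa [pvSpans, h, List.append_assoc] using
          ih ts (acc ++ [(PySem.Int.toStr s, PySem.Int.toStr (s + PySem.Str.len w), t)])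
            (s + PySem.Str.len w + 1)

theorem pvB_filterMap (ws ts : List String) (s : Int) :
    (ws.zip (ts.zip (pvStartsFrom s ws))).filterMap
      (fun wts =>
        if wts.2.1 ≠ "O" then
          some (PySem.Int.toStr wts.2.2, PySem.Int.toStr (wts.2.2 + PySem.Str.len wts.1), wts.2.1)
        else none) = pvSpans ws ts s := by
  induction ws generalizing ts s with
  | nil => simp [pvSpans]
  | cons w ws ih =>
    cases ts with
    | nil => simp [pvSpans, pvStartsFrom]
    | cons t ts =>
      have hih := ih ts (s + PySem.Str.len w + 1)
      by_cases h : t = "O" <;>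
        simp_all [pvStartsFrom, pvSpans]

-- ===== VERDICT (by name: the statement is the Claim_ definition above) =====
theorem ner_tags_to_ner_list_spec : Claim_equal_ner_tags_to_ner_list := by
  intro words tags _
  show ner_tags_to_ner_list words tags = ner_tags_to_ner_list_alt words tags
  unfold ner_tags_to_ner_list ner_tags_to_ner_list_alt
  have hs := pvStarts_foldl words [] 0
  simp only [List.nil_append] at hs
  rw [hs, pvA_foldl words tags [] 0, pvB_filterMap]
  simp
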